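-- pv_equiv track=rewrite | github.com/pypi-data/pypi-mirror-402 | packages/coden-retriever/coden_retriever-1.2.0-py3-none-any.whl/coden_retriever/mcp/flag_insertion.py | _find_insertion_line
-- ===== SOURCE A (Python) =====
-- def _find_insertion_line(
--     lines: list[str],
--     target_line: int,
--     language: str,
-- ) -> int:
--     """Find the correct line to insert comments before.
--
--     Handles decorators (Python) and annotations (Java/Kotlin) by finding
--     the first line of the decorated/annotated block.
--     """
--     if target_line <= 0 or target_line > len(lines):
--         return max(0, target_line - 1)
--
--     # Convert to 0-based index
--     idx = target_line - 1
--
--     # For Python, look for decorators above the target line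
--     if language == "python":
--         while idx > 0:
--             prev_line = lines[idx - 1].strip()
--             if prev_line.startswith("@"):
--                 idx -= 1
--             elif prev_line == "" or prev_line.startswith("#"):
--                 # Skip blank lines and comments above decorators
--                 test_idx = idx - 1
--                 while test_idx > 0 and (lines[test_idx - 1].strip() == "" or
--                                         lines[test_idx - 1].strip().startswith("#")):
--                     test_idx -= 1
--                 if test_idx > 0 and lines[test_idx - 1].strip().startswith("@"):
--                     idx = test_idx
--                 else:
--                     break
--             else:
--                 break
--
--     # For Java/Kotlin/C#, look for annotations
--     elif language in {"java", "kotlin", "c_sharp"}: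
--         while idx > 0:
--             prev_line = lines[idx - 1].strip()
--             if prev_line.startswith("@"):
--                 idx -= 1
--             elif prev_line == "":
--                 # Skip blank lines above annotations
--                 test_idx = idx - 1
--                 while test_idx > 0 and lines[test_idx - 1].strip() == "":
--                     test_idx -= 1
--                 if test_idx > 0 and lines[test_idx - 1].strip().startswith("@"):
--                     idx = test_idx
--                 else:
--                     break
--             else:
--                 break
--
--     return idx
-- ===== SOURCE B (Python) =====
-- def _find_insertion_line(
--     lines: list[str],
--     target_line: int,
--     language: str,
-- ) -> int:
--     """Single upward pass: track the topmost confirmed decorator/annotation line."""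
--     if target_line <= 0 or target_line > len(lines):
--         return max(0, target_line - 1)
--
--     idx = target_line - 1
--
--     if language == "python":
--         skippable = lambda s: s == "" or s.startswith("#")
--     elif language in ("java", "kotlin", "c_sharp"):
--         skippable = lambda s: s == ""
--     else:
--         return idx
--
--     confirmed = idx
--     for j in range(idx - 1, -1, -1):
--         s = lines[j].strip()
--         if s.startswith("@"):
--             confirmed = j
--         elif skippable(s):
--             continue
--         else:
--             break
--     return confirmed
-- ===== Notes on version B (the rewrite author's own statement) =====
-- stated objective: simpler
-- what changed: Replaces A's nested lookahead (an inner while that re-scans blank/comment runs and jumps idx) with one linear upward pass keeping a single 'confirmed' accumulator updated at decorator lines.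
import Mathlib
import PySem

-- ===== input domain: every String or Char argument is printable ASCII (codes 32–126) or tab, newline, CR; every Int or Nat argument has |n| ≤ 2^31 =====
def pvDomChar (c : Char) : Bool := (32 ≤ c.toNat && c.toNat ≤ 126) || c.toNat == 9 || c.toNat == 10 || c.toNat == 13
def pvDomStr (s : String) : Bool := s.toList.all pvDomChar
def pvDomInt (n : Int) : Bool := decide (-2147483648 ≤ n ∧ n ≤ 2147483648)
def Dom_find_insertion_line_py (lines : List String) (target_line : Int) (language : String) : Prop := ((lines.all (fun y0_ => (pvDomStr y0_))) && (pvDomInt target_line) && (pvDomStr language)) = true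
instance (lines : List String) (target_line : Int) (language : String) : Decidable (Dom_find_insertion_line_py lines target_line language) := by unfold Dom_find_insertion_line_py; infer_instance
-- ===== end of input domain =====

-- B replaces A's nested blank/comment lookahead with one linear upward pass and a
-- 'confirmed' accumulator (objective: simpler; return value only, no side effects).

-- ===== PORT A =====
-- inner while of A: `while test_idx > 0 and skip(lines[test_idx-1].strip()): test_idx -= 1`
-- ('skip' is the branch's blank(/comment) test applied to the stripped line;
--  all list indexing is provably in range, so getD is exact)
def pvSkipScanA (lines : List String) (skip : String → Bool) : Nat → Nat
  | 0 => 0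
  | t+1 => if skip (PySem.Str.strip (lines.getD t "")) then pvSkipScanA lines skip t else t+1

theorem pvSkipScanA_le (lines : List String) (skip : String → Bool) (t : Nat) :
    pvSkipScanA lines skip t ≤ t := by
  induction t with
  | zero => simp [pvSkipScanA]
  | succ k ih => simp only [pvSkipScanA]; split <;> omega

-- outer while of A (the python and java/kotlin/c_sharp branches share this shape,
-- differing only in the blank(/comment) test 'skip')
def pvLoopA (lines : List String) (skip : String → Bool) : Nat → Nat
  | 0 => 0
  | idx+1 =>
    let prev := PySem.Str.strip (lines.getD idx "")
    if PySem.Str.startswith prev "@" then pvLoopA lines skip idx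
    else if skip prev then
      let t := pvSkipScanA lines skip idx
      if 0 < t ∧ PySem.Str.startswith (PySem.Str.strip (lines.getD (t-1) "")) "@" = true then
        pvLoopA lines skip t
      else idx+1
    else idx+1
  decreasing_by
    · omega
    · have := pvSkipScanA_le lines skip idx; omega

def find_insertion_line_py (lines : List String) (target_line : Int) (language : String) : Int :=
  if target_line ≤ 0 ∨ target_line > (lines.length : Int) then max 0 (target_line - 1)
  else
    let idx : Nat := (target_line - 1).toNat
    if language == "python" then
      (pvLoopA lines (fun s => s == "" || PySem.Str.startswith s "#") idx : Int)
    else if language == "java" || language == "kotlin" || language == "c_sharp" then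
      (pvLoopA lines (fun s => s == "") idx : Int)
    else (idx : Int)

-- ===== PORT B =====
-- B's single upward pass: j runs idx-1 … 0 (first argument is j+1), c is 'confirmed'
def pvLoopB (lines : List String) (skip : String → Bool) : Nat → Nat → Nat
  | 0, c => c
  | j+1, c =>
    let s := PySem.Str.strip (lines.getD j "")
    if PySem.Str.startswith s "@" then pvLoopB lines skip j j
    else if skip s then pvLoopB lines skip j c
    else c

def find_insertion_line_py_alt (lines : List String) (target_line : Int) (language : String) : Int :=
  if target_line ≤ 0 ∨ target_line > (lines.length : Int) then max 0 (target_line - 1)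
  else
    let idx : Nat := (target_line - 1).toNat
    let skip? : Option (String → Bool) :=
      if language == "python" then some (fun s => s == "" || PySem.Str.startswith s "#")
      else if language == "java" || language == "kotlin" || language == "c_sharp" then
        some (fun s => s == "")
      else none
    match skip? with
    | none => (idx : Int)
    | some skip => (pvLoopB lines skip idx idx : Int)

-- ===== PRECONDITION & SPEC =====
def Spec_find_insertion_line_py (lines : List String) (target_line : Int) (language : String) (out : Int) : Prop := out = find_insertion_line_py_alt lines target_line language
instance (lines : List String) (target_line : Int) (language : String) (out : Int) : Decidable (Spec_find_insertion_line_py lines target_line language out) := by unfold Spec_find_insertion_line_py; infer_instance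

-- ===== CLAIM (what is proved, stated in full; the proofs are below) =====
def Claim_equal_find_insertion_line_py : Prop := ∀ (lines : List String) (target_line : Int) (language : String), Dom_find_insertion_line_py lines target_line language → Spec_find_insertion_line_py lines target_line language (find_insertion_line_py lines target_line language)

-- ===== LEMMAS AND PROOFS =====

-- a line cannot both satisfy a blank/comment test and start with "@"
theorem pvDisjPy (s : String) :
    (s == "" || PySem.Str.startswith s "#") = true → PySem.Str.startswith s "@" = false := by
  intro h
  rcases Bool.or_eq_true_iff.mp h with h1 | h1
  · have hs : s = "" := by simpa using h1
    subst hs; decide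
  · by_contra hc
    have h3 : PySem.Str.startswith s "@" = true := by
      revert hc; cases PySem.Str.startswith s "@" <;> simp
    obtain ⟨t1, ht1⟩ := (PySem.Chars.startswith_iff s.toList "#".toList).mp (by simpa using h1)
    obtain ⟨t2, ht2⟩ := (PySem.Chars.startswith_iff s.toList "@".toList).mp (by simpa using h3)
    rw [← ht1] at ht2
    simp at ht2

theorem pvDisjBlank (s : String) :
    (s == "") = true → PySem.Str.startswith s "@" = false := by
  intro h
  have hs : s = "" := by simpa using h
  subst hs; decide

-- where the inner scan stops, the blank test fails (or the top of the file is reached)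
theorem pvSkipScanA_stop (lines : List String) (skip : String → Bool) (t : Nat) :
    pvSkipScanA lines skip t = 0 ∨
      skip (PySem.Str.strip (lines.getD (pvSkipScanA lines skip t - 1) "")) = false := by
  induction t with
  | zero => left; simp [pvSkipScanA]
  | succ k ih =>
    by_cases h : skip (PySem.Str.strip (lines.getD k "")) = true
    · simpa only [pvSkipScanA, h, if_true] using ih
    · right
      simp only [pvSkipScanA, h]
      exact Bool.eq_false_iff.mpr h

-- B's pass absorbs A's inner scan: skippable lines do not change 'confirmed'
theorem pvLoopB_skipScan (lines : List String) (skip : String → Bool)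
    (hd : ∀ s, skip s = true → PySem.Str.startswith s "@" = false) (t c : Nat) :
    pvLoopB lines skip t c = pvLoopB lines skip (pvSkipScanA lines skip t) c := by
  induction t with
  | zero => simp [pvSkipScanA]
  | succ k ih =>
    simp only [pvSkipScanA]
    by_cases hS : skip (PySem.Str.strip (lines.getD k "")) = true
    · rw [if_pos hS, ← ih]
      simp only [pvLoopB, hd _ hS, hS, if_false, if_true, Bool.false_eq_true]
    · rw [if_neg hS]

-- the heart of the equivalence: A's idx-jumping loop equals B's single pass
theorem pvLoopA_eq_loopB (lines : List String) (skip : String → Bool)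
    (hd : ∀ s, skip s = true → PySem.Str.startswith s "@" = false) (idx : Nat) :
    pvLoopA lines skip idx = pvLoopB lines skip idx idx := by
  induction idx using Nat.strong_induction_on with
  | _ idx ih =>
  match idx with
  | 0 => simp [pvLoopA, pvLoopB]
  | k+1 =>
    by_cases hP : PySem.Str.startswith (PySem.Str.strip (lines.getD k "")) "@" = true
    · simp only [pvLoopA, pvLoopB, hP, if_true]
      exact ih k (by omega)
    · by_cases hS : skip (PySem.Str.strip (lines.getD k "")) = true
      · have hRB : pvLoopB lines skip (k+1) (k+1)
            = pvLoopB lines skip (pvSkipScanA lines skip k) (k+1) := by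
          rw [← pvLoopB_skipScan lines skip hd k (k+1)]
          simp only [pvLoopB, hP, hS, if_false, if_true, Bool.false_eq_true]
        set t := pvSkipScanA lines skip k with ht
        clear_value t
        have htle : t ≤ k := ht ▸ pvSkipScanA_le lines skip k
        by_cases hJ : 0 < t ∧ PySem.Str.startswith (PySem.Str.strip (lines.getD (t-1) "")) "@" = true
        · have hLA : pvLoopA lines skip (k+1) = pvLoopA lines skip t := by
            simp only [pvLoopA, hP, hS, if_false, if_true, Bool.false_eq_true, ← ht]
            rw [if_pos hJ]
          obtain ⟨hpos, hat⟩ := hJ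
          obtain ⟨s, rfl⟩ : ∃ s, t = s + 1 := ⟨t - 1, by omega⟩
          simp only [Nat.add_sub_cancel] at hat
          rw [hLA, hRB]
          simp only [pvLoopA, pvLoopB, hat, if_true]
          exact ih s (by omega)
        · have hLA : pvLoopA lines skip (k+1) = k+1 := by
            simp only [pvLoopA, hP, hS, if_false, if_true, Bool.false_eq_true, ← ht]
            rw [if_neg hJ]
          rw [hLA, hRB]
          rcases Nat.eq_zero_or_pos t with h0 | hpos
          · rw [h0]; simp [pvLoopB]
          · have hnat : PySem.Str.startswith (PySem.Str.strip (lines.getD (t-1) "")) "@" ≠ true := by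
              intro hcon; exact hJ ⟨hpos, hcon⟩
            have hnS : skip (PySem.Str.strip (lines.getD (t-1) "")) = false := by
              rcases pvSkipScanA_stop lines skip k with h0 | hst
              · omega
              · simpa [← ht] using hst
            obtain ⟨s, rfl⟩ : ∃ s, t = s + 1 := ⟨t - 1, by omega⟩
            simp only [Nat.add_sub_cancel] at hnat hnS
            simp only [pvLoopB]
            rw [if_neg (by simpa using hnat), if_neg (by simpa using hnS)]
      · simp only [pvLoopA, pvLoopB, hP, hS, if_false, Bool.false_eq_true]

-- ===== VERDICT (by name: the statement is the Claim_ definition above) =====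
theorem find_insertion_line_py_spec : Claim_equal_find_insertion_line_py := by
  intro lines target_line language _
  unfold Spec_find_insertion_line_py find_insertion_line_py find_insertion_line_py_alt
  by_cases hg : target_line ≤ 0 ∨ target_line > (lines.length : Int)
  · rw [if_pos hg, if_pos hg]
  · rw [if_neg hg, if_neg hg]
    by_cases h1 : (language == "python") = true
    · simp only [h1, if_true]
      exact congrArg _ (pvLoopA_eq_loopB lines _ pvDisjPy _)
    · simp only [h1, if_false, Bool.false_eq_true]
      by_cases h2 : (language == "java" || language == "kotlin" || language == "c_sharp") = true
      · simp only [h2, if_true]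
        exact congrArg _ (pvLoopA_eq_loopB lines _ pvDisjBlank _)
      · simp only [h2, if_false, Bool.false_eq_true]
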